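-- pv_equiv track=rewrite | github.com/chojaelong/CodingTest | code/프로그래머스/명예의전당1.py | solution
-- ===== SOURCE A (Python) =====
-- def solution(k, score):
--     answer = []
--     queue = []
--
--     for s in score:
--         size = len(queue)
--
--         if size < k:
--             queue.append(s)
--             queue.sort(reverse=True)
--             answer.append(queue[-1])
--
--         elif size == k:
--             if queue[-1] < s:
--                 queue.pop()
--                 queue.append(s)
--                 queue.sort(reverse=True)
--
--             answer.append(queue[-1])
--
--     return answer
-- ===== SOURCE B (Python) =====
-- # B: keeps the hall of fame as an ascending list maintained incrementally: a hand-written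
-- # binary search finds the insertion point and one list.insert places the new score, instead
-- # of A's append + full descending re-sort every day; the current minimum is q[0].
-- # (insert_asc mutates its local list q only; the arguments are never mutated.)
-- def insert_asc(q, s):
--     # leftmost position whose element is >= s, by binary search, then insert there
--     lo, hi = 0, len(q)
--     while lo < hi:
--         mid = (lo + hi) // 2
--         if q[mid] < s:
--             lo = mid + 1
--         else:
--             hi = mid
--     q.insert(lo, s)
--
-- def solution(k, score):
--     answer = []
--     q = []  # ascending list of the current hall-of-fame scores
--     for s in score:
--         if len(q) < k:
--             insert_asc(q, s)
--         elif q and q[0] < s: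
--             q.pop(0)
--             insert_asc(q, s)
--         if q:
--             answer.append(q[0])
--     return answer
-- ===== Notes on version B (the rewrite author's own statement) =====
-- stated objective: faster
-- what changed: B maintains the hall of fame as an ascending list updated by a hand-written binary search plus one insert (min = q[0]) instead of A's append + full descending re-sort of the top-k list on every day.
import Mathlib
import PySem

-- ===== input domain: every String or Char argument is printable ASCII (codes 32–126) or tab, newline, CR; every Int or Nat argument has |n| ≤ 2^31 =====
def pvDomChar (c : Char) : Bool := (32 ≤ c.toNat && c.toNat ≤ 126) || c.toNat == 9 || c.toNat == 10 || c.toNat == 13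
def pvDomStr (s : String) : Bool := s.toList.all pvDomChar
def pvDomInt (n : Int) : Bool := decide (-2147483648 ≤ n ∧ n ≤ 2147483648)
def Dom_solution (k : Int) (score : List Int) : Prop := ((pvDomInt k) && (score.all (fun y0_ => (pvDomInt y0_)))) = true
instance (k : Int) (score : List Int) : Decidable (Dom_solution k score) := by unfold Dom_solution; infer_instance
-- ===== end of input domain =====

-- ===== PORT A =====
-- A keeps `queue` sorted descending by re-sorting after every append; queue[-1] is the minimum.
-- pop?/getD: queue.pop() / queue[-1] can only raise on an empty queue (k = 0), excluded by Pre_.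
def solution (k : Int) (score : List Int) : List Int :=
  (score.foldl (fun (st : List Int × List Int) s =>
    let answer := st.1
    let queue := st.2
    let size : Int := queue.length
    if size < k then
      let queue2 := PySem.List.sorted (queue ++ [s]) (fun x => x) true
      (answer ++ [PySem.List.pyGetD queue2 (-1) 0], queue2)
    else if size = k then
      if PySem.List.pyGetD queue (-1) 0 < s then
        let queue2 := PySem.List.sorted
          ((((PySem.List.pop? queue (-1)).map Prod.snd).getD queue) ++ [s]) (fun x => x) true
        (answer ++ [PySem.List.pyGetD queue2 (-1) 0], queue2)
      else
        (answer ++ [PySem.List.pyGetD queue (-1) 0], queue)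
    else (answer, queue)) ([], [])).1

-- ===== PORT B =====
-- while lo < hi: mid = (lo + hi) // 2; if q[mid] < s: lo = mid + 1 else: hi = mid
-- (q[mid] via getD: mid < hi <= len(q) on every call solution_alt makes, so the default is never read)
def bsLo (q : List Int) (s : Int) (lo hi : Nat) : Nat :=
  if lo < hi then
    let mid := (lo + hi) / 2
    if q.getD mid 0 < s then bsLo q s (mid + 1) hi else bsLo q s lo mid
  else lo
termination_by hi - lo
decreasing_by all_goals omega

-- insert_asc(q, s): binary search for the leftmost position >= s, then q.insert(lo, s)
def insertAsc (q : List Int) (s : Int) : List Int :=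
  PySem.List.insert q ((bsLo q s 0 q.length : Nat) : Int) s

def solution_alt (k : Int) (score : List Int) : List Int :=
  (score.foldl (fun (st : List Int × List Int) s =>
    let answer := st.1
    let q := st.2
    let q2 := if (q.length : Int) < k then insertAsc q s
              else match q with
                   | [] => q
                   | x :: rest => if x < s then insertAsc rest s else q
    match q2 with
    | [] => (answer, q2)
    | x :: _ => (answer ++ [x], q2)) ([], [])).1

-- ===== PRECONDITION & SPEC =====
-- A raises IndexError (queue[-1] on the empty queue) exactly when k = 0 and score ≠ []; only those inputs are excluded.
def Pre_solution (k : Int) (score : List Int) : Prop := k ≠ 0 ∨ score = []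
instance (k : Int) (score : List Int) : Decidable (Pre_solution k score) := by
  unfold Pre_solution; infer_instance
def pvWitness_solution : Int × List Int := (2, [10, 20, 5, 20])

def Spec_solution (k : Int) (score : List Int) (out : List Int) : Prop := out = solution_alt k score
instance (k : Int) (score : List Int) (out : List Int) : Decidable (Spec_solution k score out) := by
  unfold Spec_solution; infer_instance

-- ===== CLAIM (what is proved, stated in full; the proofs are below) =====
def Claim_equal_solution : Prop := ∀ (k : Int) (score : List Int),
  Dom_solution k score → Pre_solution k score → Spec_solution k score (solution k score)

-- ===== LEMMAS AND PROOFS =====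

-- the two fold bodies, named for the proofs (definitionally the lambdas inside the ports)
def stepA (k : Int) (st : List Int × List Int) (s : Int) : List Int × List Int :=
  let answer := st.1
  let queue := st.2
  let size : Int := queue.length
  if size < k then
    let queue2 := PySem.List.sorted (queue ++ [s]) (fun x => x) true
    (answer ++ [PySem.List.pyGetD queue2 (-1) 0], queue2)
  else if size = k then
    if PySem.List.pyGetD queue (-1) 0 < s then
      let queue2 := PySem.List.sorted
        ((((PySem.List.pop? queue (-1)).map Prod.snd).getD queue) ++ [s]) (fun x => x) true
      (answer ++ [PySem.List.pyGetD queue2 (-1) 0], queue2)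
    else
      (answer ++ [PySem.List.pyGetD queue (-1) 0], queue)
  else (answer, queue)

def stepB (k : Int) (st : List Int × List Int) (s : Int) : List Int × List Int :=
  let answer := st.1
  let q := st.2
  let q2 := if (q.length : Int) < k then insertAsc q s
            else match q with
                 | [] => q
                 | x :: rest => if x < s then insertAsc rest s else q
  match q2 with
  | [] => (answer, q2)
  | x :: _ => (answer ++ [x], q2)

theorem solution_eq_fold (k : Int) (score : List Int) :
    solution k score = (score.foldl (stepA k) ([], [])).1 := rfl

theorem solution_alt_eq_fold (k : Int) (score : List Int) :
    solution_alt k score = (score.foldl (stepB k) ([], [])).1 := rfl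

theorem bsLo_spec (q : List Int) (s : Int) (hq : q.Pairwise (· ≤ ·)) :
    ∀ (n lo hi : Nat), hi - lo ≤ n → lo ≤ hi → hi ≤ q.length →
      (∀ i (_ : i < q.length), i < lo → q[i] < s) →
      (∀ i (_ : i < q.length), hi ≤ i → s ≤ q[i]) →
      bsLo q s lo hi ≤ q.length ∧
      (∀ i (_ : i < q.length), i < bsLo q s lo hi → q[i] < s) ∧
      (∀ i (_ : i < q.length), bsLo q s lo hi ≤ i → s ≤ q[i]) := by
  intro n
  induction n with
  | zero =>
    intro lo hi hfuel hlohi hlen hlo hhi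
    have h : lo = hi := by omega
    rw [bsLo, if_neg (by omega)]
    exact ⟨by omega, fun i hi' hip => hlo i hi' hip, fun i hi' hpi => hhi i hi' (by omega)⟩
  | succ n ih =>
    intro lo hi hfuel hlohi hlen hlo hhi
    rw [bsLo]
    by_cases hlt : lo < hi
    · rw [if_pos hlt]
      have hmidlt : (lo + hi) / 2 < q.length := by omega
      have hget : q.getD ((lo + hi) / 2) 0 = q[(lo + hi) / 2] := List.getD_eq_getElem _ _ hmidlt
      simp only [hget]
      by_cases hcmp : q[(lo + hi) / 2] < s
      · rw [if_pos hcmp]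
        refine ih ((lo + hi) / 2 + 1) hi (by omega) (by omega) hlen ?_ hhi
        intro i hi' hip
        rcases Nat.lt_or_ge i ((lo + hi) / 2) with h' | h'
        · calc q[i] ≤ q[(lo + hi) / 2] := by
                exact List.pairwise_iff_getElem.mp hq i _ hi' hmidlt h'
            _ < s := hcmp
        · have : i = (lo + hi) / 2 := by omega
          subst this; exact hcmp
      · rw [if_neg hcmp]
        refine ih lo ((lo + hi) / 2) (by omega) (by omega) (by omega) hlo ?_
        intro i hi' hip
        rcases Nat.lt_or_ge ((lo + hi) / 2) i with h' | h'
        · calc s ≤ q[(lo + hi) / 2] := by omega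
            _ ≤ q[i] := List.pairwise_iff_getElem.mp hq _ i hmidlt hi' h'
        · have : i = (lo + hi) / 2 := by omega
          subst this; omega
    · rw [if_neg hlt]
      have h : lo = hi := by omega
      exact ⟨by omega, fun i hi' hip => hlo i hi' hip, fun i hi' hpi => hhi i hi' (by omega)⟩

theorem insert_take_drop (q : List Int) (p : Nat) (hp : p ≤ q.length) (s : Int) :
    PySem.List.insert q (p : Int) s = q.take p ++ s :: q.drop p := by
  simp only [PySem.List.insert, PySem.List.sliceIndices]
  have h : (if (p : Int) < 0 then max ((p : Int) + (q.length : Int)) (if (1:Int) < 0 then -1 else 0)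
      else min (p : Int) (if (1:Int) < 0 then (q.length : Int) - 1 else (q.length : Int)))
      = (p : Int) := by norm_num; omega
  rw [h, Int.toNat_natCast]

theorem insertAsc_eq (q : List Int) (s : Int) (hq : q.Pairwise (· ≤ ·)) :
    insertAsc q s = q.take (bsLo q s 0 q.length) ++ s :: q.drop (bsLo q s 0 q.length) := by
  have hb := bsLo_spec q s hq q.length 0 q.length (by omega) (by omega) le_rfl
    (by omega) (by intro i h1 h2; omega)
  exact insert_take_drop q _ hb.1 s

theorem insertAsc_perm (q : List Int) (s : Int) (hq : q.Pairwise (· ≤ ·)) :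
    (insertAsc q s).Perm (s :: q) := by
  rw [insertAsc_eq q s hq]
  have := List.perm_middle (a := s) (l₁ := q.take (bsLo q s 0 q.length))
    (l₂ := q.drop (bsLo q s 0 q.length))
  rwa [List.take_append_drop] at this

theorem insertAsc_pairwise (q : List Int) (s : Int) (hq : q.Pairwise (· ≤ ·)) :
    (insertAsc q s).Pairwise (· ≤ ·) := by
  have hb := bsLo_spec q s hq q.length 0 q.length (by omega) (by omega) le_rfl
    (by omega) (by intro i h1 h2; omega)
  rw [insertAsc_eq q s hq]
  rw [List.pairwise_append]
  refine ⟨hq.take, List.pairwise_cons.mpr ⟨?_, hq.drop⟩, ?_⟩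
  · intro b hb'
    obtain ⟨j, hj, rfl⟩ := List.mem_iff_getElem.mp hb'
    rw [List.getElem_drop]
    exact hb.2.2 _ (by simp at hj; omega) (by omega)
  · intro a ha b hbm
    obtain ⟨i, hi, rfl⟩ := List.mem_iff_getElem.mp ha
    rw [List.getElem_take] at *
    have hilt : i < bsLo q s 0 q.length := by simp at hi; omega
    have has : q[i] < s := hb.2.1 _ (by simp at hi; omega) hilt
    rcases List.mem_cons.mp hbm with rfl | hbm'
    · omega
    · obtain ⟨j, hj, rfl⟩ := List.mem_iff_getElem.mp hbm'
      rw [List.getElem_drop]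
      have := hb.2.2 (bsLo q s 0 q.length + j) (by simp at hj; omega) (by omega)
      omega

theorem insertAsc_length (q : List Int) (s : Int) (hq : q.Pairwise (· ≤ ·)) :
    (insertAsc q s).length = q.length + 1 := by
  simpa using (insertAsc_perm q s hq).length_eq

theorem insertAsc_ne_nil (q : List Int) (s : Int) (hq : q.Pairwise (· ≤ ·)) :
    insertAsc q s ≠ [] := by
  intro hcon
  have := insertAsc_length q s hq
  rw [hcon] at this
  simp at this

theorem insertAsc_cons_exists (q : List Int) (s : Int) (hq : q.Pairwise (· ≤ ·)) :
    ∃ h t, insertAsc q s = h :: t := by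
  rcases e : insertAsc q s with _ | ⟨a, b⟩
  · exact absurd e (insertAsc_ne_nil q s hq)
  · exact ⟨a, b, rfl⟩

-- sorted(xs, reverse=True) equals the reverse of any ascending-sorted rearrangement of xs
theorem sortedRev_eq_reverse (xs ys : List Int) (h : ys.Perm xs) (hp : ys.Pairwise (· ≤ ·)) :
    PySem.List.sorted xs (fun x => x) true = ys.reverse := by
  refine List.Perm.eq_of_pairwise (le := fun a b : Int => b ≤ a) ?_ ?_ ?_ ?_
  · intro a b _ _ h1 h2; omega
  · exact PySem.List.sorted_pairwise_rev xs (fun x => x)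
  · exact List.pairwise_reverse.mpr hp
  · exact (PySem.List.sorted_perm xs _ true).trans (h.symm.trans ys.reverse_perm.symm)

-- the ascending list sorted descending: what A's re-sort produces from B's state plus s
theorem sorted_insertAsc (q : List Int) (s : Int) (hq : q.Pairwise (· ≤ ·)) :
    PySem.List.sorted (q.reverse ++ [s]) (fun x => x) true = (insertAsc q s).reverse := by
  refine sortedRev_eq_reverse _ _ ?_ (insertAsc_pairwise q s hq)
  exact (insertAsc_perm q s hq).trans
    ((q.reverse_perm.cons s).symm.trans (List.perm_append_singleton s q.reverse).symm)

-- one synchronized pass: A's queue stays the reverse of B's ascending q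
theorem fold_agree (k : Int) (hk : k ≠ 0) :
    ∀ (score ans qB : List Int), qB.Pairwise (· ≤ ·) → (qB = [] ∨ (qB.length : Int) ≤ k) →
      (score.foldl (stepA k) (ans, qB.reverse)).1 = (score.foldl (stepB k) (ans, qB)).1 := by
  intro score
  induction score with
  | nil => intro ans qB _ _; rfl
  | cons s rest ih =>
    intro ans qB hpw hlen
    rw [List.foldl_cons, List.foldl_cons]
    by_cases hlt : (qB.length : Int) < k
    · -- filling phase: both insert s
      obtain ⟨h0, t0, hins⟩ := insertAsc_cons_exists qB s hpw
      have hA : stepA k (ans, qB.reverse) s = (ans ++ [h0], (insertAsc qB s).reverse) := by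
        simp only [stepA, List.length_reverse]
        rw [if_pos hlt, sorted_insertAsc qB s hpw, hins]
        simp [PySem.List.pyGetD_neg_one_append_singleton]
      have hB : stepB k (ans, qB) s = (ans ++ [h0], insertAsc qB s) := by
        simp only [stepB]
        rw [if_pos hlt, hins]
      rw [hA, hB, hins]
      refine ih _ _ (hins ▸ insertAsc_pairwise qB s hpw) (Or.inr ?_)
      have := insertAsc_length qB s hpw
      rw [hins] at this
      omega
    · rcases hlen with hnil | hle
      · -- k < 0 and the queue stays empty: both steps do nothing
        subst hnil
        have hA : stepA k (ans, ([] : List Int).reverse) s = (ans, ([] : List Int).reverse) := by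
          simp only [stepA, List.reverse_nil, List.length_nil]
          rw [if_neg (by exact_mod_cast hlt), if_neg (by omega)]
        have hB : stepB k (ans, ([] : List Int)) s = (ans, ([] : List Int)) := by
          simp only [stepB]
          rw [if_neg (by exact_mod_cast hlt)]
        rw [hA, hB]
        exact ih _ _ hpw (Or.inl rfl)
      · have heq : (qB.length : Int) = k := by omega
        have hpos : 0 < qB.length := by
          rcases Nat.eq_zero_or_pos qB.length with h0 | h0
          · exfalso; apply hk; omega
          · exact h0
        rcases qB with _ | ⟨x, t⟩
        · simp at hpos
        · have hrevx : (x :: t).reverse = t.reverse ++ [x] := by simp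
          have hget : PySem.List.pyGetD ((x :: t).reverse) (-1) 0 = x := by
            rw [hrevx]; exact PySem.List.pyGetD_neg_one_append_singleton _ _ _
          by_cases hxs : x < s
          · -- replace the minimum x by s
            have hpwt : t.Pairwise (· ≤ ·) := (List.pairwise_cons.mp hpw).2
            obtain ⟨h0, t0, hins⟩ := insertAsc_cons_exists t s hpwt
            have hpop : ((PySem.List.pop? ((x :: t).reverse) (-1)).map Prod.snd).getD
                ((x :: t).reverse) = t.reverse := by
              rw [hrevx, PySem.List.pop?_last]; rfl
            have hA : stepA k (ans, (x :: t).reverse) s =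
                (ans ++ [h0], (insertAsc t s).reverse) := by
              simp only [stepA, List.length_reverse]
              rw [if_neg (by simpa using hlt), if_pos heq, hget, if_pos hxs, hpop,
                  sorted_insertAsc t s hpwt, hins]
              simp [PySem.List.pyGetD_neg_one_append_singleton]
            have hB : stepB k (ans, x :: t) s = (ans ++ [h0], insertAsc t s) := by
              simp only [stepB]
              rw [if_neg (by simpa using hlt)]
              simp only [if_pos hxs]
              rw [hins]
            rw [hA, hB, hins]
            refine ih _ _ (hins ▸ insertAsc_pairwise t s hpwt) (Or.inr ?_)
            have := insertAsc_length t s hpwt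
            rw [hins] at this
            simp at heq
            omega
          · -- keep the queue; both record the current minimum x
            have hA : stepA k (ans, (x :: t).reverse) s =
                (ans ++ [x], (x :: t).reverse) := by
              simp only [stepA, List.length_reverse]
              rw [if_neg (by simpa using hlt), if_pos heq, hget, if_neg hxs]
            have hB : stepB k (ans, x :: t) s = (ans ++ [x], x :: t) := by
              simp only [stepB]
              rw [if_neg (by simpa using hlt)]
              simp only [if_neg hxs]
            rw [hA, hB]
            exact ih _ _ hpw (Or.inr hle)

-- ===== VERDICT (by name: the statement is the Claim_ definition above) =====
theorem solution_spec : Claim_equal_solution := by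
  intro k score _ hpre
  unfold Spec_solution
  rcases hpre with hk | hnil
  · rw [solution_eq_fold, solution_alt_eq_fold]
    have := fold_agree k hk score [] [] (by simp) (Or.inl rfl)
    simpa using this
  · subst hnil; rfl
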